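-- pv_equiv track=rewrite | github.com/bradykim7/cursor-setting | agents/python/consistency_check/agent.py | format_severity_summary
-- ===== SOURCE A (Python) =====
-- def format_severity_summary(inconsistencies: list) -> str:
--     counts = {"high": 0, "medium": 0, "low": 0}
--     for item in inconsistencies:
--         sev = item.get("severity", "low")
--         counts[sev] = counts.get(sev, 0) + 1
--     parts = []
--     if counts["high"]:
--         parts.append(f"HIGH {counts['high']}건")
--     if counts["medium"]:
--         parts.append(f"MEDIUM {counts['medium']}건")
--     if counts["low"]:
--         parts.append(f"LOW {counts['low']}건")
--     return ", ".join(parts) if parts else "불일치 없음"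
-- ===== SOURCE B (Python) =====
-- SEVERITY_LABELS = [("high", "HIGH"), ("medium", "MEDIUM"), ("low", "LOW")]
--
-- def format_severity_summary(inconsistencies: list) -> str:
--     parts = []
--     for key, label in SEVERITY_LABELS:
--         count = sum(1 for item in inconsistencies if item.get("severity", "low") == key)
--         if count:
--             parts.append(f"{label} {count}건")
--     return ", ".join(parts) if parts else "불일치 없음"
-- ===== Notes on version B (the rewrite author's own statement) =====
-- stated objective: simpler
-- what changed: Replaces the mutable count dict built in one pass plus three hand-written if-blocks with a single data-driven loop over an ordered (key, label) table, computing each level's count by its own scan and appending the labelled part directly.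
import Mathlib
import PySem

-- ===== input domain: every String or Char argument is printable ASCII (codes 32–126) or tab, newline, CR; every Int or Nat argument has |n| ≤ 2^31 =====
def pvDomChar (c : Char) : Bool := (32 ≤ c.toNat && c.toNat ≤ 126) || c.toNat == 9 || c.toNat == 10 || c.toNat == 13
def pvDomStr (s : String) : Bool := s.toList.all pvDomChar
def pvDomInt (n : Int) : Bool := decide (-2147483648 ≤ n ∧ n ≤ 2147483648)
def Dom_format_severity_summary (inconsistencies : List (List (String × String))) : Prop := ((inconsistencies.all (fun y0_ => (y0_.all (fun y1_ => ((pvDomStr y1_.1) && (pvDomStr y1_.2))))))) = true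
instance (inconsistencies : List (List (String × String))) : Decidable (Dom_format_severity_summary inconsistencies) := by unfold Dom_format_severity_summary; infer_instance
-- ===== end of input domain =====

-- B replaces A's single counting pass into a mutable dict plus three copy-pasted if-blocks
-- by a data-driven loop over an ordered (key, label) table with one counting scan per level (objective: simpler).

-- ===== PORT A =====
-- counts[sev] = counts.get(sev, 0) + 1, starting from {"high":0,"medium":0,"low":0}
def format_severity_summary (inconsistencies : List (List (String × String))) : String :=
  let counts : PySem.Dict String Int :=
    inconsistencies.foldl
      (fun d item =>
        let sev := (PySem.Dict.mk item).getD "severity" "low"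
        d.insert sev (d.getD sev 0 + 1))
      (PySem.Dict.mk [("high", (0 : Int)), ("medium", 0), ("low", 0)])
  -- counts["high"] etc. never raise: the keys are in the initial dict, so getD's default is never used
  let parts : List String := []
  let parts := if counts.getD "high" 0 ≠ 0 then
      parts ++ ["HIGH " ++ PySem.Int.toStr (counts.getD "high" 0) ++ "건"] else parts
  let parts := if counts.getD "medium" 0 ≠ 0 then
      parts ++ ["MEDIUM " ++ PySem.Int.toStr (counts.getD "medium" 0) ++ "건"] else parts
  let parts := if counts.getD "low" 0 ≠ 0 then
      parts ++ ["LOW " ++ PySem.Int.toStr (counts.getD "low" 0) ++ "건"] else parts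
  if parts ≠ [] then PySem.Str.join ", " parts else "불일치 없음"

-- ===== PORT B =====
def pvSeverityLabels : List (String × String) := [("high", "HIGH"), ("medium", "MEDIUM"), ("low", "LOW")]

-- sum(1 for item in inconsistencies if item.get("severity", "low") == key)
def pvSevCount (inconsistencies : List (List (String × String))) (key : String) : Int :=
  inconsistencies.foldl
    (fun acc item => if (PySem.Dict.mk item).getD "severity" "low" == key then acc + 1 else acc) 0

def format_severity_summary_alt (inconsistencies : List (List (String × String))) : String :=
  let parts :=
    pvSeverityLabels.foldl
      (fun parts kl =>
        let count := pvSevCount inconsistencies kl.1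
        if count ≠ 0 then parts ++ [kl.2 ++ " " ++ PySem.Int.toStr count ++ "건"] else parts)
      []
  if parts ≠ [] then PySem.Str.join ", " parts else "불일치 없음"

-- ===== PRECONDITION & SPEC =====
def Spec_format_severity_summary (inconsistencies : List (List (String × String))) (out : String) : Prop := out = format_severity_summary_alt inconsistencies
instance (inconsistencies : List (List (String × String))) (out : String) : Decidable (Spec_format_severity_summary inconsistencies out) := by unfold Spec_format_severity_summary; infer_instance

-- ===== CLAIM (what is proved, stated in full; the proofs are below) =====
def Claim_equal_format_severity_summary : Prop := ∀ (inconsistencies : List (List (String × String))), Dom_format_severity_summary inconsistencies → Spec_format_severity_summary inconsistencies (format_severity_summary inconsistencies)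

-- ===== LEMMAS AND PROOFS =====

-- shifting the initial accumulator out of B's counting fold
lemma pvSevCount_shift (xs : List (List (String × String))) (key : String) (n : Int) :
    xs.foldl (fun acc item => if (PySem.Dict.mk item).getD "severity" "low" == key then acc + 1 else acc) n
      = n + pvSevCount xs key := by
  unfold pvSevCount
  induction xs generalizing n with
  | nil => simp
  | cons x xs ih =>
    simp only [List.foldl]
    rw [ih]
    conv_rhs => rw [ih]
    split <;> ring

-- A's counting fold, read back per key: final count = initial count + B's per-key count
lemma pv_fold_getD (xs : List (List (String × String))) (d : PySem.Dict String Int) (k : String) :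
    (xs.foldl
      (fun d item =>
        let sev := (PySem.Dict.mk item).getD "severity" "low"
        d.insert sev (d.getD sev 0 + 1)) d).getD k 0
      = d.getD k 0 + pvSevCount xs k := by
  induction xs generalizing d with
  | nil => simp [pvSevCount]
  | cons x xs ih =>
    simp only [List.foldl]
    rw [ih]
    have hcons : pvSevCount (x :: xs) k
        = (if (PySem.Dict.mk x).getD "severity" "low" == k then (1 : Int) else 0) + pvSevCount xs k := by
      unfold pvSevCount
      simp only [List.foldl]
      rw [pvSevCount_shift]
      split <;> simp [pvSevCount]
    rw [hcons, PySem.Dict.getD_insert]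
    by_cases h : k = (PySem.Dict.mk x).getD "severity" "low"
    · simp [h]; ring
    · have : ((PySem.Dict.mk x).getD "severity" "low" == k) = false := by
        simp; exact fun hh => h hh.symm
      simp [h, this]

-- ===== VERDICT (by name: the statement is the Claim_ definition above) =====
theorem format_severity_summary_spec : Claim_equal_format_severity_summary := by
  intro xs _
  unfold Spec_format_severity_summary format_severity_summary format_severity_summary_alt pvSeverityLabels
  simp only [List.foldl]
  rw [pv_fold_getD, pv_fold_getD, pv_fold_getD]
  have hh : (PySem.Dict.mk [("high", (0 : Int)), ("medium", 0), ("low", 0)]).getD "high" 0 = 0 := by decide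
  have hm : (PySem.Dict.mk [("high", (0 : Int)), ("medium", 0), ("low", 0)]).getD "medium" 0 = 0 := by decide
  have hl : (PySem.Dict.mk [("high", (0 : Int)), ("medium", 0), ("low", 0)]).getD "low" 0 = 0 := by decide
  rw [hh, hm, hl]
  simp only [zero_add]
  have e1 : ("HIGH" ++ " " : String) = "HIGH " := by decide
  have e2 : ("MEDIUM" ++ " " : String) = "MEDIUM " := by decide
  have e3 : ("LOW" ++ " " : String) = "LOW " := by decide
  rw [e1, e2, e3]
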